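-- pv_equiv track=rewrite | github.com/kelvinhekelvin12399/AIsubTranslate | subTranslate.py | process_subtitles
-- ===== SOURCE A (Python) =====
-- def process_subtitles(text, batch_size):
--     subtitle_blocks = text.split('\n\n')
--     processed_batches = []
--     # 分批处理字幕
--     for batch_start in range(0, len(subtitle_blocks), batch_size):
--         batch_blocks = subtitle_blocks[batch_start:batch_start + batch_size]
--         processed_batch = []
--         for block in batch_blocks:
--             lines = block.split('\n')
--             subtitle_text = ' '.join(lines[2:])  # 合并每个字幕块的文本为一行
--             processed_batch.append(subtitle_text.strip())
--         processed_text_for_batch = '\n'.join(processed_batch)  # 使用句尾符将不同块的文本分隔开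
--         processed_batches.append(processed_text_for_batch)  # 将整个批次的处理后文本添加到列表中
--     return processed_batches
-- ===== SOURCE B (Python) =====
-- def process_subtitles(text, batch_size):
--     # Single streaming pass with an accumulator: collect reformatted block texts
--     # into the current batch and flush it whenever it reaches batch_size.
--     if batch_size <= 0:
--         return []
--     batches = []
--     current = []
--     for block in text.split('\n\n'):
--         lines = block.split('\n')
--         current.append(' '.join(lines[2:]).strip())
--         if len(current) == batch_size:
--             batches.append('\n'.join(current))
--             current = []
--     if current:
--         batches.append('\n'.join(current))
--     return batches
-- ===== Notes on version B (the rewrite author's own statement) =====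
-- stated objective: alternative
-- what changed: Replaces A's index-range-plus-slicing batching (outer loop over range(0,n,batch_size), inner loop over a sliced sublist) with a single streaming pass that appends each reformatted block to a current-batch accumulator and flushes it whenever it reaches batch_size, flushing a final partial batch at the end; no index arithmetic or slicing.
import Mathlib
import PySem

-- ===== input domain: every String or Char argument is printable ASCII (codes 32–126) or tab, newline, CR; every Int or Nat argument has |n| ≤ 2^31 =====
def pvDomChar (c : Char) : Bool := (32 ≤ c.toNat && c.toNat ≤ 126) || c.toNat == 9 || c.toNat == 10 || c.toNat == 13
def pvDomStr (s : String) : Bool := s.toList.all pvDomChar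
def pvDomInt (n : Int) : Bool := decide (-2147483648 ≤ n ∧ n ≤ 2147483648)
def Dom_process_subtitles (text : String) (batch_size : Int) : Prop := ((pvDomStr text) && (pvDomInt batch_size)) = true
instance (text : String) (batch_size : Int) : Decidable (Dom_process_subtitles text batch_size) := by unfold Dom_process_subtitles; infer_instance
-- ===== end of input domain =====

-- B replaces A's range/slice batching with one streaming pass over the blocks that flushes an
-- accumulator whenever it reaches batch_size (objective: alternative decomposition, same cost).

-- ===== PORT A =====
def process_subtitles (text : String) (batch_size : Int) : List String :=
  let subtitle_blocks := (PySem.Str.split? text "\n\n").getD []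
  (PySem.List.pyRange 0 subtitle_blocks.length batch_size).foldl
    (fun processed_batches batch_start =>
      let batch_blocks := PySem.List.slice subtitle_blocks (some batch_start) (some (batch_start + batch_size))
      let processed_batch := batch_blocks.foldl
        (fun processed_batch block =>
          let lines := (PySem.Str.split? block "\n").getD []
          let subtitle_text := PySem.Str.join " " (PySem.List.slice lines (some 2) none)
          processed_batch ++ [PySem.Str.strip subtitle_text]) []
      processed_batches ++ [PySem.Str.join "\n" processed_batch]) []

-- ===== PORT B =====
def process_subtitles_alt (text : String) (batch_size : Int) : List String :=
  if batch_size ≤ 0 then []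
  else
    let st := ((PySem.Str.split? text "\n\n").getD []).foldl
      (fun (st : List String × List String) block =>
        let lines := (PySem.Str.split? block "\n").getD []
        let current := st.2 ++ [PySem.Str.strip (PySem.Str.join " " (PySem.List.slice lines (some 2) none))]
        if (current.length : Int) = batch_size then (st.1 ++ [PySem.Str.join "\n" current], [])
        else (st.1, current)) ([], [])
    if st.2.isEmpty then st.1 else st.1 ++ [PySem.Str.join "\n" st.2]

-- ===== PRECONDITION & SPEC =====
-- batch_size = 0 is excluded: range(0, n, 0) raises ValueError in A.
def Pre_process_subtitles (text : String) (batch_size : Int) : Prop := batch_size ≠ 0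
instance (text : String) (batch_size : Int) : Decidable (Pre_process_subtitles text batch_size) := by unfold Pre_process_subtitles; infer_instance
def pvWitness_process_subtitles : String × Int := ("1\n00:00 --> 00:01\nHello\nworld\n\n2\n00:01 --> 00:02\nBye", 2)

def Spec_process_subtitles (text : String) (batch_size : Int) (out : List String) : Prop := out = process_subtitles_alt text batch_size
instance (text : String) (batch_size : Int) (out : List String) : Decidable (Spec_process_subtitles text batch_size out) := by unfold Spec_process_subtitles; infer_instance

-- ===== CLAIM (what is proved, stated in full; the proofs are below) =====
def Claim_equal_process_subtitles : Prop := ∀ (text : String) (batch_size : Int), Dom_process_subtitles text batch_size → Pre_process_subtitles text batch_size → Spec_process_subtitles text batch_size (process_subtitles text batch_size)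

-- ===== LEMMAS AND PROOFS =====

-- the per-block reformatting both programs apply
def pvFmt (block : String) : String :=
  PySem.Str.strip (PySem.Str.join " " (PySem.List.slice ((PySem.Str.split? block "\n").getD []) (some 2) none))

-- B's fold step, expressed on already-reformatted strings
def pvStep (k : Int) (st : List String × List String) (p : String) : List String × List String :=
  let current := st.2 ++ [p]
  if (current.length : Int) = k then (st.1 ++ [PySem.Str.join "\n" current], []) else (st.1, current)

def pvFin (st : List String × List String) : List String :=
  if st.2.isEmpty then st.1 else st.1 ++ [PySem.Str.join "\n" st.2]

-- the common reference shape: join each chunk of k consecutive reformatted blocks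
def pvChunkJoin (k : Nat) (ps : List String) : List String :=
  if h : ps = [] then [] else
    PySem.Str.join "\n" (ps.take k) :: pvChunkJoin k (ps.drop (max k 1))
termination_by ps.length
decreasing_by
  have : ps.length ≠ 0 := fun hl => h (List.eq_nil_of_length_eq_zero hl)
  simp; omega

theorem pvChunkJoin_nil (k : Nat) : pvChunkJoin k [] = [] := by
  rw [pvChunkJoin]; simp

theorem pvChunkJoin_pos (k : Nat) (ps : List String) (hk : 0 < k) (hps : ps ≠ []) :
    pvChunkJoin k ps = PySem.Str.join "\n" (ps.take k) :: pvChunkJoin k (ps.drop k) := by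
  rw [pvChunkJoin]
  simp only [hps, dite_false]
  rw [max_eq_left hk]

-- map commutes with Python slicing (slice is clamped drop/take, which map commutes with)
theorem pv_slice_map {α β : Type} (f : α → β) (xs : List α) (a? b? : Option Int) :
    PySem.List.slice (xs.map f) a? b? = (PySem.List.slice xs a? b?).map f := by
  cases a? <;> cases b? <;>
    simp [PySem.List.slice, PySem.List.clampIdx, List.map_drop, List.map_take]

theorem pv_pyRange_nonpos (n k : Int) (hn : n ≤ 0) (hk : 0 < k) :
    PySem.List.pyRange 0 n k = [] := by
  rw [PySem.List.pyRange_of_pos _ _ hk, if_neg (by omega : ¬ (0:Int) < n)]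
  simp

theorem pv_pyRange_neg (n k : Int) (hn : 0 ≤ n) (hk : k < 0) :
    PySem.List.pyRange 0 n k = [] := by
  simp only [PySem.List.pyRange]
  rw [if_neg (by omega : ¬ k = 0), if_neg (by omega : ¬ (0:Int) < k), if_neg (by omega : ¬ n < 0)]
  simp

theorem pv_pyRange_pos_cons (n k : Int) (hk : 0 < k) (hn : 0 < n) :
    PySem.List.pyRange 0 n k = 0 :: (PySem.List.pyRange 0 (n - k) k).map (· + k) := by
  rw [PySem.List.pyRange_of_pos _ _ hk, PySem.List.pyRange_of_pos _ _ hk]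
  simp only [sub_zero]
  have h1 : (n + k - 1) / k = (n - 1) / k + 1 := by
    rw [show n + k - 1 = (n - 1) + 1 * k by ring, Int.add_mul_ediv_right _ _ (by omega : k ≠ 0)]
  by_cases hnk : 0 < n - k
  · have h2 : n - k + k - 1 = n - 1 := by ring
    have hge : 0 ≤ (n - 1) / k := Int.ediv_nonneg (by omega) (by omega)
    rw [if_pos hn, if_pos hnk, h2, h1,
        show ((n - 1) / k + 1).toNat = ((n - 1) / k).toNat + 1 by omega,
        List.range_succ_eq_map]
    rw [List.map_cons, List.map_map, List.map_map]
    refine congrArg₂ List.cons (by norm_num) ?_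
    exact List.map_congr_left (fun a _ => by simp only [Function.comp]; push_cast; ring)
  · have hz : (n - 1) / k = 0 := Int.ediv_eq_zero_of_lt (by omega) (by omega)
    rw [if_pos hn, if_neg hnk, h1, hz]
    simp

-- slicing at a shifted offset is slicing the dropped list (for in-range offsets)
theorem pv_slice_shift (ps : List String) (j k : Int) (hj : 0 ≤ j) (hk : 0 ≤ k) :
    PySem.List.slice ps (some (j + k)) (some (j + k + k)) =
      PySem.List.slice (ps.drop k.toNat) (some j) (some (j + k)) := by
  rw [PySem.List.slice_toNat _ (by omega) (by omega),
      PySem.List.slice_toNat _ hj (by omega), List.drop_drop]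
  have e1 : (j + k + k).toNat - (j + k).toNat = (j + k).toNat - j.toNat := by omega
  have e2 : (j + k).toNat = j.toNat + k.toNat := by omega
  rw [e1, e2, Nat.add_comm k.toNat j.toNat]

-- ===== A-side: the range/slice fold computes pvChunkJoin =====
theorem pvA_eq_chunk (k : Int) (hk : 0 < k) :
    ∀ (n : Nat) (ps : List String), ps.length = n →
      (PySem.List.pyRange 0 (ps.length : Int) k).map
        (fun i => PySem.Str.join "\n" (PySem.List.slice ps (some i) (some (i + k)))) =
      pvChunkJoin k.toNat ps := by
  intro n
  induction n using Nat.strong_induction_on with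
  | _ n ih =>
    intro ps hlen
    by_cases hps : ps = []
    · subst hps
      simp only [List.length_nil, Nat.cast_zero]
      rw [pv_pyRange_nonpos 0 k (le_refl 0) hk]
      simp [pvChunkJoin_nil]
    · have hn : 0 < (ps.length : Int) := by
        have := List.length_pos_iff.mpr hps; exact_mod_cast this
      rw [pv_pyRange_pos_cons _ _ hk hn]
      rw [List.map_cons, List.map_map]
      rw [pvChunkJoin_pos _ _ (by omega) hps]
      congr 1
      · -- head: slice ps 0 (0+k) = ps.take k.toNat
        rw [zero_add]
        congr 1
        rw [PySem.List.slice_toNat _ (le_refl (0:Int)) (by omega)]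
        simp
      · -- tail
        have hcong : ((PySem.List.pyRange 0 ((ps.length : Int) - k) k).map
            ((fun i => PySem.Str.join "\n" (PySem.List.slice ps (some i) (some (i + k)))) ∘ (· + k))) =
            (PySem.List.pyRange 0 ((ps.drop k.toNat).length : Int) k).map
            (fun i => PySem.Str.join "\n" (PySem.List.slice (ps.drop k.toNat) (some i) (some (i + k)))) := by
          by_cases hbig : (ps.length : Int) - k ≤ 0
          · rw [pv_pyRange_nonpos _ _ hbig hk, pv_pyRange_nonpos _ _ (by simp; omega) hk]
            simp
          · have hlen2 : ((ps.drop k.toNat).length : Int) = (ps.length : Int) - k := by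
              simp; omega
            rw [hlen2]
            refine List.map_congr_left ?_
            intro j hj
            have hj0 : 0 ≤ j := ((PySem.List.mem_pyRange_iff_of_pos hk j).mp hj).1
            simp only [Function.comp]
            rw [show j + k + k = (j + k) + k by ring] at *
            rw [pv_slice_shift ps j k hj0 (by omega)]
        rw [hcong]
        exact ih (ps.drop k.toNat).length (by simp; omega) _ rfl

-- ===== B-side lemmas =====
-- the accumulated batches are only appended to
theorem pvB_prefix (k : Int) :
    ∀ (xs : List String) (b cur : List String),
      xs.foldl (pvStep k) (b, cur) =
        (b ++ (xs.foldl (pvStep k) ([], cur)).1, (xs.foldl (pvStep k) ([], cur)).2) := by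
  intro xs
  induction xs with
  | nil => intro b cur; simp
  | cons x xs ih =>
    intro b cur
    simp only [List.foldl_cons]
    by_cases h : ((cur ++ [x]).length : Int) = k
    · have hs : ∀ b' : List String, pvStep k (b', cur) x = (b' ++ [PySem.Str.join "\n" (cur ++ [x])], []) := by
        intro b'; simp only [pvStep, h, if_true]
      rw [hs b, hs [], ih (b ++ [PySem.Str.join "\n" (cur ++ [x])]) [],
          ih ([] ++ [PySem.Str.join "\n" (cur ++ [x])]) []]
      simp
    · have hs : ∀ b' : List String, pvStep k (b', cur) x = (b', cur ++ [x]) := by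
        intro b'; simp only [pvStep, h, if_false]
      rw [hs b, hs [], ih b (cur ++ [x]), ih [] (cur ++ [x])]

-- filling without reaching k just appends to the current batch
theorem pvB_fill (k : Int) :
    ∀ (xs cur b : List String), (cur.length : Int) + xs.length < k →
      xs.foldl (pvStep k) (b, cur) = (b, cur ++ xs) := by
  intro xs
  induction xs with
  | nil => intro cur b _; simp
  | cons x xs ih =>
    intro cur b h
    simp only [List.foldl_cons, List.length_cons] at *
    have hne : ¬ (((cur ++ [x]).length : Int) = k) := by simp; push_cast; omega
    simp only [pvStep, hne, if_false]
    rw [ih (cur ++ [x]) b (by simp; push_cast at *; omega)]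
    simp

-- filling to exactly k flushes once and empties the current batch
theorem pvB_flush (k : Int) :
    ∀ (xs cur b : List String), xs ≠ [] → (cur.length : Int) + xs.length = k →
      xs.foldl (pvStep k) (b, cur) = (b ++ [PySem.Str.join "\n" (cur ++ xs)], []) := by
  intro xs
  induction xs with
  | nil => intro cur b hne _; exact absurd rfl hne
  | cons x xs ih =>
    intro cur b _ h
    simp only [List.length_cons] at h
    cases xs with
    | nil =>
      have heq : ((cur ++ [x]).length : Int) = k := by
        simp only [List.length_append, List.length_cons, List.length_nil] at h ⊢
        push_cast at h ⊢; omega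
      simp only [List.foldl_cons, List.foldl_nil, pvStep, heq, if_true]
    | cons y ys =>
      have hne : ¬ (((cur ++ [x]).length : Int) = k) := by
        simp only [List.length_append, List.length_singleton, List.length_cons, List.length_nil] at h ⊢
        push_cast at h ⊢; omega
      have hstep : pvStep k (b, cur) x = (b, cur ++ [x]) := by
        simp only [pvStep, hne, if_false]
      rw [List.foldl_cons, hstep,
          ih (cur ++ [x]) b (by simp)
            (by simp only [List.length_append, List.length_singleton, List.length_cons, List.length_nil] at h ⊢
                push_cast at h ⊢; omega)]
      simp

theorem pvB_eq_chunk (k : Int) (hk : 0 < k) :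
    ∀ (n : Nat) (ps : List String), ps.length = n →
      pvFin (ps.foldl (pvStep k) ([], [])) = pvChunkJoin k.toNat ps := by
  intro n
  induction n using Nat.strong_induction_on with
  | _ n ih =>
    intro ps hlen
    by_cases hps : ps = []
    · subst hps; simp [pvFin, pvChunkJoin_nil]
    · by_cases hsmall : (ps.length : Int) < k
      · -- everything fits in one (partial) batch
        rw [pvB_fill k ps [] [] (by simpa using hsmall)]
        rw [pvChunkJoin_pos _ _ (by omega) hps]
        have htake : ps.take k.toNat = ps := List.take_of_length_le (by omega)
        have hdrop : ps.drop k.toNat = [] := List.drop_eq_nil_of_le (by omega)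
        rw [htake, hdrop, pvChunkJoin_nil]
        simp [pvFin, hps]
      · -- a full first batch flushes, then recurse
        have hsplit : ps = ps.take k.toNat ++ ps.drop k.toNat := (List.take_append_drop _ _).symm
        have hlt : k.toNat ≤ ps.length := by omega
        have htlen : (ps.take k.toNat).length = k.toNat := by simp; omega
        conv_lhs => rw [hsplit]
        rw [List.foldl_append]
        rw [pvB_flush k (ps.take k.toNat) [] []
            (by intro hnil; rw [hnil] at htlen; simp at htlen; omega)
            (by rw [htlen]; simp; omega)]
        rw [pvB_prefix k (ps.drop k.toNat)]
        rw [pvChunkJoin_pos _ _ (by omega) hps]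
        have hrest := ih (ps.drop k.toNat).length (by simp; omega) (ps.drop k.toNat) rfl
        rw [← hrest]
        simp only [pvFin]
        by_cases hemp : ((ps.drop k.toNat).foldl (pvStep k) ([], [])).2.isEmpty
        · simp [hemp]
        · simp [hemp]

-- ===== VERDICT (by name: the statement is the Claim_ definition above) =====
theorem process_subtitles_spec : Claim_equal_process_subtitles := by
  intro text batch_size _ hpre
  unfold Spec_process_subtitles process_subtitles process_subtitles_alt
  unfold Pre_process_subtitles at hpre
  dsimp only
  by_cases hk : batch_size ≤ 0
  · -- negative batch_size: the range is empty, B's guard returns []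
    rw [if_pos hk]
    rw [pv_pyRange_neg _ _ (by positivity) (by omega)]
    simp
  · rw [if_neg hk]
    push_neg at hk
    -- rewrite A's inner fold to a map of pvFmt, then both sides to pvChunkJoin
    have hA : ∀ (bs : List String) (i : Int),
        (PySem.List.slice bs (some i) (some (i + batch_size))).foldl
          (fun pb block => pb ++ [pvFmt block]) [] =
        (PySem.List.slice (bs.map pvFmt) (some i) (some (i + batch_size))) := by
      intro bs i
      rw [PySem.List.foldl_append_singleton_eq_map, List.nil_append, pv_slice_map]
    set bs := (PySem.Str.split? text "\n\n").getD [] with hbs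
    calc (PySem.List.pyRange 0 (bs.length : Int) batch_size).foldl
          (fun processed_batches batch_start =>
            processed_batches ++ [PySem.Str.join "\n"
              ((PySem.List.slice bs (some batch_start) (some (batch_start + batch_size))).foldl
                (fun pb block => pb ++ [pvFmt block]) [])]) []
        = (PySem.List.pyRange 0 ((bs.map pvFmt).length : Int) batch_size).map
            (fun i => PySem.Str.join "\n"
              (PySem.List.slice (bs.map pvFmt) (some i) (some (i + batch_size)))) := by
          rw [PySem.List.foldl_append_singleton_eq_map, List.nil_append]
          simp only [List.length_map]
          exact List.map_congr_left (fun i _ => by rw [hA])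
      _ = pvChunkJoin batch_size.toNat (bs.map pvFmt) :=
          pvA_eq_chunk batch_size hk _ (bs.map pvFmt) rfl
      _ = pvFin ((bs.map pvFmt).foldl (pvStep batch_size) ([], [])) :=
          (pvB_eq_chunk batch_size hk _ (bs.map pvFmt) rfl).symm
      _ = _ := by
          rw [List.foldl_map]
          rfl
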